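-- pv_equiv track=rewrite | github.com/pypi-data/pypi-mirror-333 | packages/Equimo/equimo-0.2.4.tar.gz/equimo-0.2.4/equimo/utils.py | nearest_power_of_2_divisor
-- ===== SOURCE A (Python) =====
-- def nearest_power_of_2_divisor(dim: int, max: int):
--     """Find the largest power of 2 that divides dim, up to a maximum value.
--
--     Args:
--         dim: The number to find divisors for
--         max: Maximum value to consider (must be a power of 2)
--
--     Returns:
--         int: Largest power of 2 that divides dim, not exceeding max
--
--     Example:
--         >>> nearest_power_of_2_divisor(24, 32)
--         8  # because 8 is the largest power of 2 <= 32 that divides 24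
--     """
--     power = 1
--     nearest = 1
--     while power <= max:
--         if dim % power == 0:
--             nearest = power
--         power *= 2
--     return nearest
-- ===== SOURCE B (Python) =====
-- def nearest_power_of_2_divisor(dim: int, max: int):
--     # Two-phase top-down version: climb to the largest power of 2 <= max,
--     # then scan downward and return the first power dividing dim.
--     power = 1
--     while power * 2 <= max:
--         power *= 2
--     while power >= 1:
--         if dim % power == 0:
--             return power
--         power //= 2
--     return 1
-- ===== Notes on version B (the rewrite author's own statement) =====
-- stated objective: alternative
-- what changed: A's single bottom-up scan that keeps the last dividing power is replaced by two phases: climb to the largest power of 2 <= max, then scan downward returning the first power that divides dim.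
import Mathlib
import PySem

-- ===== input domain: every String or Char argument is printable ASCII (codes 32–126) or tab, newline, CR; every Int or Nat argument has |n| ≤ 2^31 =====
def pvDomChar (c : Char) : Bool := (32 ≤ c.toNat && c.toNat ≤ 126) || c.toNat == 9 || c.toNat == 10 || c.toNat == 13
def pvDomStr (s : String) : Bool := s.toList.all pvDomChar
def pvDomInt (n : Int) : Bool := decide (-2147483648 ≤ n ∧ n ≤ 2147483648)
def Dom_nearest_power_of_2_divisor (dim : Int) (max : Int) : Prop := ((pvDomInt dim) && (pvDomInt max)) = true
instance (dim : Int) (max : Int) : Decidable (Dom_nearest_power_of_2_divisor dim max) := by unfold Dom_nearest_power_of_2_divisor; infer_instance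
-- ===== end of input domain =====

-- B replaces A's bottom-up keep-the-last-divisor scan by a two-phase top-down first-match scan (alternative decomposition, same cost).


-- ===== PORT A =====
-- A's while loop: power doubles while power ≤ max, keeping the last power dividing dim.
def npLoopA (dim max power nearest : Int) (hp : 0 < power) : Int :=
  if h : power ≤ max then
    npLoopA dim max (power * 2) (if PySem.Int.mod dim power == 0 then power else nearest) (by omega)
  else nearest
termination_by (max + 1 - power).toNat
decreasing_by omega

def nearest_power_of_2_divisor (dim : Int) (max : Int) : Int :=
  npLoopA dim max 1 1 (by norm_num)

-- ===== PORT B =====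
-- B phase 1: climb to the largest power of 2 ≤ max.
def npUp (max power : Int) (hp : 0 < power) : Int :=
  if h : power * 2 ≤ max then npUp max (power * 2) (by omega) else power -- h used by npUp.induct
termination_by (max - power).toNat
decreasing_by omega

-- B phase 2: scan downward, return the first power dividing dim (else the `return 1` fallback).
def npDown (dim p : Int) : Int :=
  if _h : 1 ≤ p then
    if PySem.Int.mod dim p == 0 then p else npDown dim (PySem.Int.floordiv p 2)
  else 1
termination_by p.toNat
decreasing_by
  rw [PySem.Int.floordiv_eq_ediv_of_pos (by norm_num)]
  omega

def nearest_power_of_2_divisor_alt (dim : Int) (max : Int) : Int :=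
  npDown dim (npUp max 1 (by norm_num))

-- ===== PRECONDITION & SPEC =====
def Spec_nearest_power_of_2_divisor (dim : Int) (max : Int) (out : Int) : Prop := out = nearest_power_of_2_divisor_alt dim max
instance (dim : Int) (max : Int) (out : Int) : Decidable (Spec_nearest_power_of_2_divisor dim max out) := by unfold Spec_nearest_power_of_2_divisor; infer_instance

-- ===== CLAIM (what is proved, stated in full; the proofs are below) =====
def Claim_equal_nearest_power_of_2_divisor : Prop := ∀ (dim : Int) (max : Int), Dom_nearest_power_of_2_divisor dim max → Spec_nearest_power_of_2_divisor dim max (nearest_power_of_2_divisor dim max)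

-- ===== LEMMAS AND PROOFS =====

-- The ascending chain power, 2*power, … of values A's loop visits (those ≤ max).
def npPows (max power : Int) (hp : 0 < power) : List Int :=
  if h : power ≤ max then power :: npPows max (power * 2) (by omega) else []
termination_by (max + 1 - power).toNat
decreasing_by omega

-- A's loop is a left fold of the keep-the-last-divisor step over the chain.
theorem npLoopA_eq_foldl (dim max : Int) : ∀ (power nearest : Int) (hp : 0 < power),
    npLoopA dim max power nearest hp =
      List.foldl (fun n q => if PySem.Int.mod dim q == 0 then q else n) nearest (npPows max power hp) := by
  intro power nearest hp
  induction power, nearest, hp using npLoopA.induct dim max with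
  | case1 power nearest hp h ih =>
    rw [npLoopA, npPows]
    simp only [h, dif_pos, List.foldl_cons]
    exact ih
  | case2 power nearest hp h =>
    rw [npLoopA, npPows]
    simp [h]

-- keep-the-last fold = first match of the reversed list.
theorem foldl_last_eq_find_rev (d : Int → Bool) : ∀ (L : List Int) (n : Int),
    List.foldl (fun n q => if d q then q else n) n L = ((L.reverse.find? d).getD n) := by
  intro L
  induction L with
  | nil => intro n; simp
  | cons q L ih =>
    intro n
    simp only [List.foldl_cons, List.reverse_cons, List.find?_append]
    rw [ih]
    cases hf : L.reverse.find? d with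
    | some r => simp
    | none =>
      simp only [Option.getD]
      by_cases hd : d q = true <;> simp [hd]

-- (power*2)/2 = power for Python floor division.
theorem floordiv_double (power : Int) : PySem.Int.floordiv (power * 2) 2 = power := by
  rw [PySem.Int.floordiv_eq_ediv_of_pos (by norm_num)]
  omega

-- Top-down scan from the top of the chain = first match in the reversed chain,
-- falling through to the scan below the chain's base.
theorem npDown_eq_find (dim max : Int) : ∀ (power : Int) (hp : 0 < power), power ≤ max →
    npDown dim (npUp max power hp) =
      (((npPows max power hp).reverse.find? (fun q => PySem.Int.mod dim q == 0)).getD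
        (npDown dim (PySem.Int.floordiv power 2))) := by
  intro power hp
  induction power, hp using npUp.induct max with
  | case1 power hp h ih =>
    intro _
    rw [npUp, dif_pos h, npPows, dif_pos (by omega : power ≤ max)]
    rw [ih (by omega)]
    simp only [List.reverse_cons, List.find?_append, floordiv_double]
    cases hf : (npPows max (power * 2) (by omega)).reverse.find? (fun q => PySem.Int.mod dim q == 0) with
    | some r => simp
    | none =>
      simp only [Option.getD]
      rw [npDown, dif_pos (by omega : 1 ≤ power)]
      by_cases hd : (PySem.Int.mod dim power == 0) = true <;> simp [hd]
  | case2 power hp h =>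
    intro hle
    rw [npUp, dif_neg h, npPows, dif_pos hle, npPows, dif_neg (by omega : ¬ power * 2 ≤ max)]
    rw [npDown, dif_pos (by omega : 1 ≤ power)]
    by_cases hd : (PySem.Int.mod dim power == 0) = true <;> simp [hd]

theorem npDown_zero (dim : Int) : npDown dim 0 = 1 := by
  rw [npDown]; simp

-- ===== VERDICT (by name: the statement is the Claim_ definition above) =====
theorem nearest_power_of_2_divisor_spec : Claim_equal_nearest_power_of_2_divisor := by
  intro dim max _
  unfold Spec_nearest_power_of_2_divisor nearest_power_of_2_divisor nearest_power_of_2_divisor_alt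
  rw [npLoopA_eq_foldl, foldl_last_eq_find_rev]
  by_cases hmax : (1 : Int) ≤ max
  · rw [npDown_eq_find dim max 1 (by norm_num) hmax]
    have : PySem.Int.floordiv 1 2 = 0 := by decide
    rw [this, npDown_zero]
  · rw [npPows, dif_neg hmax]
    rw [npUp, dif_neg (by omega)]
    rw [npDown, dif_pos (by norm_num)]
    have h1 : PySem.Int.mod dim 1 = 0 := (PySem.Int.mod_eq_zero_iff_dvd dim 1).mpr (one_dvd dim)
    have : PySem.Int.floordiv 1 2 = 0 := by decide
    simp
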